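-- pv_equiv track=rewrite | github.com/vedantadhobley/spin-cycle | src/utils/quote_detection.py | _find_with_boundary
-- ===== SOURCE A (Python) =====
-- _BOUNDARY_CHARS = frozenset(' .,;:!?\'"()[]{}\n\t-/')
--
-- def _has_word_boundary(text: str, start: int, end: int) -> bool:
--     """Check if a match has word boundaries on both sides."""
--     start_ok = (start == 0) or (text[start - 1] in _BOUNDARY_CHARS)
--     end_ok = (end >= len(text)) or (text[end] in _BOUNDARY_CHARS)
--     return start_ok and end_ok
--
-- def _find_with_boundary(text: str, pattern: str) -> int:
--     """Find pattern in text with word boundaries. Returns index or -1."""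
--     start = 0
--     while True:
--         idx = text.find(pattern, start)
--         if idx == -1:
--             return -1
--         if _has_word_boundary(text, idx, idx + len(pattern)):
--             return idx
--         start = idx + 1
-- ===== SOURCE B (Python) =====
-- _BOUNDARY_CHARS = frozenset(' .,;:!?\'"()[]{}\n\t-/')
--
-- def _has_word_boundary(text: str, start: int, end: int) -> bool:
--     """Check if a match has word boundaries on both sides."""
--     start_ok = (start == 0) or (text[start - 1] in _BOUNDARY_CHARS)
--     end_ok = (end >= len(text)) or (text[end] in _BOUNDARY_CHARS)
--     return start_ok and end_ok
--
-- def _find_with_boundary(text: str, pattern: str) -> int: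
--     """Find pattern in text with word boundaries: scan candidate positions directly."""
--     n = len(pattern)
--     for idx in range(len(text) - n + 1):
--         if text[idx:idx + n] == pattern and _has_word_boundary(text, idx, idx + n):
--             return idx
--     return -1
-- ===== Notes on version B (the rewrite author's own statement) =====
-- stated objective: simpler
-- what changed: Replaces the while-True loop that repeatedly calls str.find and restarts after rejected matches with a single direct scan over candidate indices, comparing the slice at each index and checking the boundary there.
import Mathlib
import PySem

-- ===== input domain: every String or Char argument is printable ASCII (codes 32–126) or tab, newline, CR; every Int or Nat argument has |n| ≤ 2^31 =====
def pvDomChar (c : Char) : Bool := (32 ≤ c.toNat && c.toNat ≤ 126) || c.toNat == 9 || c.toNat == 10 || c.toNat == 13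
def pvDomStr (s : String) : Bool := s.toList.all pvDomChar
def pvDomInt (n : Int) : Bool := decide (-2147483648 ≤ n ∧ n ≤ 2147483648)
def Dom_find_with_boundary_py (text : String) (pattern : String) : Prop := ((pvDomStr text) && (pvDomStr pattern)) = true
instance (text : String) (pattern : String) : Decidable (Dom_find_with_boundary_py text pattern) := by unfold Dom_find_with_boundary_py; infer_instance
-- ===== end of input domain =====

-- B replaces A's str.find-and-retry while-loop by a single direct scan of candidate
-- indices (slice comparison + the same boundary test); objective: simpler.

-- ===== PORT A =====
-- _BOUNDARY_CHARS (membership only, so a plain list of the distinct characters)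
def boundaryChars : List Char := " .,;:!?'\"()[]{}\n\t-/".toList

-- _has_word_boundary; List.getD's default is never consulted on the (always
-- in-range) indices either program passes here.
def hasWordBoundary (t : List Char) (s e : Nat) : Bool :=
  ((s == 0) || boundaryChars.contains (t.getD (s - 1) ' ')) &&
  ((decide (t.length ≤ e)) || boundaryChars.contains (t.getD e ' '))

-- the while-True loop of A; fuel = len(text)+1 always suffices (start strictly
-- increases and find fails once start exceeds len(text))
def findLoopA (t p : List Char) (start fuel : Nat) : Int :=
  match fuel with
  | 0 => -1
  | f + 1 =>
    let idx := PySem.Chars.findFrom t p (start : Int) none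
    if idx = -1 then -1
    else if hasWordBoundary t idx.toNat (idx.toNat + p.length) then idx
    else findLoopA t p (idx.toNat + 1) f

def find_with_boundary_py (text : String) (pattern : String) : Int :=
  findLoopA text.toList pattern.toList 0 (text.toList.length + 1)

-- ===== PORT B =====
-- for idx in range(len(text) - n + 1): if text[idx:idx+n] == pattern and boundary: return idx; return -1
def find_with_boundary_py_alt (text : String) (pattern : String) : Int :=
  let t := text.toList
  let p := pattern.toList
  let n := p.length
  match (List.range (t.length + 1 - n)).find? (fun (idx : Nat) =>
      (PySem.List.slice t (some (idx : Int)) (some ((idx : Int) + (n : Int))) == p) &&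
      hasWordBoundary t idx (idx + n)) with
  | some idx => (idx : Int)
  | none => -1

-- ===== PRECONDITION & SPEC =====
def Spec_find_with_boundary_py (text : String) (pattern : String) (out : Int) : Prop := out = find_with_boundary_py_alt text pattern
instance (text : String) (pattern : String) (out : Int) : Decidable (Spec_find_with_boundary_py text pattern out) := by unfold Spec_find_with_boundary_py; infer_instance

-- ===== CLAIM (what is proved, stated in full; the proofs are below) =====
def Claim_equal_find_with_boundary_py : Prop := ∀ (text : String) (pattern : String), Dom_find_with_boundary_py text pattern → Spec_find_with_boundary_py text pattern (find_with_boundary_py text pattern)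

-- ===== LEMMAS AND PROOFS =====

-- the common "candidate is accepted" predicate
def good (t p : List Char) (i : Nat) : Bool :=
  p.isPrefixOf (t.drop i) && hasWordBoundary t i (i + p.length)

-- B's per-index test equals `good`
theorem alt_pred_eq_good (t p : List Char) (i : Nat) :
    ((PySem.List.slice t (some (i : Int)) (some ((i : Int) + (p.length : Int))) == p) &&
      hasWordBoundary t i (i + p.length)) = good t p i := by
  rw [PySem.List.slice_natCast_add]
  unfold good
  congr 1
  rw [Bool.eq_iff_iff, beq_iff_eq, List.isPrefixOf_iff_prefix, List.prefix_iff_eq_take]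
  constructor
  · intro h; exact h.symm
  · intro h; exact h.symm

-- A's find fails once start exceeds len(text)
theorem findFrom_past (t p : List Char) (start : Nat) (h : t.length < start) :
    PySem.Chars.findFrom t p (start : Int) none = -1 := by
  unfold PySem.Chars.findFrom
  have h1 : ¬ ((start : Int) < 0) := by omega
  have h2 : ((t.length : Int) < (start : Int)) := by omega
  simp only [h1, if_false, h2, if_true]

-- no occurrence of p at or after `start` when find fails there
theorem no_prefix_of_find_neg (t p : List Char) (start : Nat)
    (hr : PySem.Chars.find (t.drop start) p = -1) :
    ∀ i, start ≤ i → ¬ p <+: t.drop i := by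
  intro i hi hpre
  rw [PySem.Chars.find_eq_neg_one_iff] at hr
  apply hr
  rw [← PySem.Chars.isIn_iff_infix, ← PySem.Chars.exists_prefix_drop_iff_isIn]
  refine ⟨i - start, ?_⟩
  rwa [List.drop_drop, Nat.add_sub_cancel' hi]

-- the while-loop of A returns the first good index ≥ start (given enough fuel)
theorem findLoopA_eq (t p : List Char) :
    ∀ fuel start, t.length + 1 ≤ start + fuel →
    findLoopA t p start fuel =
      (match (List.range' start (t.length + 1 - p.length - start)).find? (good t p) with
       | some i => (i : Int)
       | none => -1) := by
  intro fuel
  induction fuel with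
  | zero =>
    intro start h
    have hc : t.length + 1 - p.length - start = 0 := by omega
    simp [findLoopA, hc]
  | succ f ih =>
    intro start h
    by_cases hs : t.length < start
    · have hc : t.length + 1 - p.length - start = 0 := by omega
      simp [findLoopA, findFrom_past t p start hs, hc]
    · have hs' : start ≤ t.length := by omega
      rw [findLoopA]
      simp only [PySem.Chars.findFrom_natCast t p start hs']
      by_cases hr : PySem.Chars.find (t.drop start) p = -1
      · have hnone : (List.range' start (t.length + 1 - p.length - start)).find? (good t p) = none := by
          rw [List.find?_eq_none]
          intro x hx
          have hx' := (List.mem_range'_1.mp hx).1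
          unfold good
          simp only [Bool.and_eq_true, List.isPrefixOf_iff_prefix, not_and]
          intro hpre
          exact absurd hpre (no_prefix_of_find_neg t p start hr x hx')
        simp [hr, hnone]
      · -- an occurrence exists
        set r := PySem.Chars.find (t.drop start) p with hrdef
        have hr0 : 0 ≤ r := by
          have := PySem.Chars.neg_one_le_find (t.drop start) p
          omega
        have hrlen : r ≤ ((t.drop start).length : Int) := PySem.Chars.find_le_length _ _
        obtain ⟨hpre, hmin⟩ := PySem.Chars.find_spec (s := t.drop start) (sub := p) hr0
        set k := r.toNat with hk
        set idxN := start + k with hidxN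
        have hidx_le : idxN ≤ t.length := by
          simp [List.length_drop] at hrlen
          omega
        have hpre' : p <+: t.drop idxN := by
          rwa [List.drop_drop] at hpre
        have hmin' : ∀ i, start ≤ i → i < idxN → ¬ p <+: t.drop i := by
          intro i hi1 hi2 hp
          apply hmin (i - start) (by omega)
          rwa [List.drop_drop, Nat.add_sub_cancel' hi1]
        have hn_le : p.length ≤ t.length - idxN := by
          have := hpre'.length_le
          simp [List.length_drop] at this
          omega
        have hidx_lt : idxN < t.length + 1 - p.length := by omega
        -- decompose the range at idxN
        have hm_le : idxN - start ≤ t.length + 1 - p.length - start := by omega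
        have hsplit : List.range' start (t.length + 1 - p.length - start) =
            List.range' start (idxN - start) ++ List.range' idxN (t.length + 1 - p.length - idxN) := by
          have := List.range'_append (s := start) (m := idxN - start)
            (n := t.length + 1 - p.length - idxN) (step := 1)
          simp only [Nat.one_mul] at this
          rw [show start + (idxN - start) = idxN from by omega] at this
          rw [show (idxN - start) + (t.length + 1 - p.length - idxN) = t.length + 1 - p.length - start from by omega] at this
          exact this.symm
        have hfirst : (List.range' start (idxN - start)).find? (good t p) = none := by
          rw [List.find?_eq_none]
          intro x hx
          obtain ⟨hx1, hx2⟩ := List.mem_range'_1.mp hx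
          unfold good
          simp only [Bool.and_eq_true, List.isPrefixOf_iff_prefix, not_and]
          intro hpx
          exact absurd hpx (hmin' x hx1 (by omega))
        have hcons : List.range' idxN (t.length + 1 - p.length - idxN) =
            idxN :: List.range' (idxN + 1) (t.length + 1 - p.length - (idxN + 1)) := by
          conv_lhs => rw [show t.length + 1 - p.length - idxN = (t.length + 1 - p.length - (idxN + 1)) + 1 from by omega]
          rw [List.range'_succ]
        have hints : ((start : Int) + r) = (idxN : Int) := by omega
        rw [hsplit, List.find?_append, hfirst, Option.none_or, hcons, List.find?_cons]
        simp only [if_neg hr]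
        rw [hints]
        have hni : ¬ ((idxN : Int) = -1) := by omega
        rw [if_neg hni]
        simp only [Int.toNat_natCast]
        by_cases hb : hasWordBoundary t idxN (idxN + p.length)
        · have hgood : good t p idxN = true := by
            unfold good
            simp [List.isPrefixOf_iff_prefix, hpre', hb]
          rw [if_pos hb, hgood]
        · have hgood : good t p idxN = false := by
            unfold good
            simp [hb]
          rw [if_neg hb, hgood]
          simpa using ih (idxN + 1) (by omega)

-- ===== VERDICT (by name: the statement is the Claim_ definition above) =====
theorem find_with_boundary_py_spec : Claim_equal_find_with_boundary_py := by
  intro text pattern _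
  unfold Spec_find_with_boundary_py find_with_boundary_py find_with_boundary_py_alt
  rw [findLoopA_eq text.toList pattern.toList (text.toList.length + 1) 0 (by omega)]
  simp only [alt_pred_eq_good, List.range_eq_range', Nat.sub_zero]
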